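-- pv_equiv track=rewrite | github.com/junghunkim916/Quarto_AI | competition/mcts기존/machines_p1.py | line_win
-- ===== SOURCE A (Python) =====
-- pieces = [(i, j, k, l)
--           for i in range(2)
--           for j in range(2)
--           for k in range(2)
--           for l in range(2)]
--
-- def line_win(line):
--     """한 줄(line)에 놓인 4개의 piece가 특정 속성 하나를 공유하는지"""
--     if 0 in line:
--         return False
--     chars = [pieces[idx - 1] for idx in line]
--     for i in range(4):
--         if len({ch[i] for ch in chars}) == 1:
--             return True
--     return False
-- ===== SOURCE B (Python) =====
-- pieces = [(i, j, k, l)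
--           for i in range(2)
--           for j in range(2)
--           for k in range(2)
--           for l in range(2)]
--
-- def line_win(line):
--     """한 줄(line)에 놓인 4개의 piece가 특정 속성 하나를 공유하는지"""
--     if not line or 0 in line:
--         return False
--     c0 = c1 = c2 = c3 = n = 0
--     for idx in line:
--         ch = pieces[idx - 1]
--         c0 += ch[0]
--         c1 += ch[1]
--         c2 += ch[2]
--         c3 += ch[3]
--         n += 1
--     return any(c == 0 or c == n for c in (c0, c1, c2, c3))
-- ===== Notes on version B (the rewrite author's own statement) =====
-- stated objective: alternative
-- what changed: Instead of materialising the tuple list and building a de-duplicating set per attribute, B makes one pass over the line keeping four running attribute sums and a piece count, and wins iff some sum is 0 or equals the count.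
import Mathlib
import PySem

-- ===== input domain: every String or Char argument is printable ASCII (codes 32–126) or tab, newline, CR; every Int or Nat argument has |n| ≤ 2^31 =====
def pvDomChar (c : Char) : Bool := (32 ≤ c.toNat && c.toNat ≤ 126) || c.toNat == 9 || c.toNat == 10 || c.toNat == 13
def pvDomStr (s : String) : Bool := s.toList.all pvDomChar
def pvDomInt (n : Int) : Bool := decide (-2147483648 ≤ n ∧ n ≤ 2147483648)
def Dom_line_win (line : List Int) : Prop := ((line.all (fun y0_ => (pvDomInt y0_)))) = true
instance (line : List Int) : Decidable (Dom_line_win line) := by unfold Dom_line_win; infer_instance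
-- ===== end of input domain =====

-- B replaces A's "build the four tuples, then one de-duplicating set per attribute" with a single
-- pass that keeps four running attribute sums and the piece count; a line wins iff some sum is 0 or
-- equals the count (objective: alternative single-pass formulation).

-- ===== PORT A =====
-- module constant: pieces = [(i,j,k,l) for i in range(2) ...] (tuples ported as 4-element lists,
-- since the code accesses them only by integer index)
def piecesA : List (List Int) :=
  (PySem.List.pyRange 0 2 1).flatMap (fun i =>
    (PySem.List.pyRange 0 2 1).flatMap (fun j =>
      (PySem.List.pyRange 0 2 1).flatMap (fun k =>
        (PySem.List.pyRange 0 2 1).map (fun l => [i, j, k, l]))))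

def line_win (line : List Int) : Bool :=
  if line.contains (0 : Int) then false
  else
    let chars := line.map (fun idx => PySem.List.pyGetD piecesA (idx - 1) ([] : List Int))
    (PySem.List.pyRange 0 4 1).any (fun i =>
      PySem.Set.len (PySem.Set.ofList (chars.map (fun ch => PySem.List.pyGetD ch i (0 : Int)))) == 1)

-- ===== PORT B =====
-- B's module has the identical 'pieces' constant
def piecesB : List (List Int) :=
  (PySem.List.pyRange 0 2 1).flatMap (fun i =>
    (PySem.List.pyRange 0 2 1).flatMap (fun j =>
      (PySem.List.pyRange 0 2 1).flatMap (fun k =>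
        (PySem.List.pyRange 0 2 1).map (fun l => [i, j, k, l]))))

-- one iteration of B's loop body: (c0,c1,c2,c3,n) updated with pieces[idx-1]
def stepB (st : Int × Int × Int × Int × Int) (idx : Int) : Int × Int × Int × Int × Int :=
  let ch := PySem.List.pyGetD piecesB (idx - 1) ([] : List Int)
  (st.1 + PySem.List.pyGetD ch 0 (0 : Int),
   st.2.1 + PySem.List.pyGetD ch 1 (0 : Int),
   st.2.2.1 + PySem.List.pyGetD ch 2 (0 : Int),
   st.2.2.2.1 + PySem.List.pyGetD ch 3 (0 : Int),
   st.2.2.2.2 + 1)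

def line_win_alt (line : List Int) : Bool :=
  if line.isEmpty || line.contains (0 : Int) then false
  else
    let st := line.foldl stepB (0, 0, 0, 0, 0)
    [st.1, st.2.1, st.2.2.1, st.2.2.2.1].any (fun c => c == 0 || c == st.2.2.2.2)

-- ===== PRECONDITION & SPEC =====
-- Pre_ excludes exactly the inputs where Python A raises IndexError: some idx in the line has
-- pieces[idx - 1] out of range (and the line contains no 0, whose guard returns before the lookup).
def Pre_line_win (line : List Int) : Prop :=
  (0 : Int) ∈ line ∨ ∀ idx ∈ line, -15 ≤ idx ∧ idx ≤ 16
instance (line : List Int) : Decidable (Pre_line_win line) := by unfold Pre_line_win; infer_instance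

def pvWitness_line_win : List Int := [1, 6, 11, 16]

def Spec_line_win (line : List Int) (out : Bool) : Prop := out = line_win_alt line
instance (line : List Int) (out : Bool) : Decidable (Spec_line_win line out) := by
  unfold Spec_line_win; infer_instance

-- ===== CLAIM (what is proved, stated in full; the proofs are below) =====
def Claim_equal_line_win : Prop :=
  ∀ (line : List Int), Dom_line_win line → Pre_line_win line → Spec_line_win line (line_win line)

-- ===== LEMMAS AND PROOFS =====

-- the value of attribute i of the piece looked up for idx (both modules' pieces are identical)
def vB (i : Int) (idx : Int) : Int :=
  PySem.List.pyGetD (PySem.List.pyGetD piecesA (idx - 1) ([] : List Int)) i (0 : Int)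

theorem stepB_eq (st : Int × Int × Int × Int × Int) (idx : Int) :
    stepB st idx =
      (st.1 + vB 0 idx, st.2.1 + vB 1 idx, st.2.2.1 + vB 2 idx,
       st.2.2.2.1 + vB 3 idx, st.2.2.2.2 + 1) := rfl

theorem foldB_eq (line : List Int) (a b c d n : Int) :
    line.foldl stepB (a, b, c, d, n) =
      (a + (line.map (vB 0)).sum, b + (line.map (vB 1)).sum, c + (line.map (vB 2)).sum,
       d + (line.map (vB 3)).sum, n + line.length) := by
  induction line generalizing a b c d n with
  | nil => simp
  | cons x xs ih =>
    simp only [List.foldl_cons, stepB_eq, ih, List.map_cons, List.sum_cons, List.length_cons,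
      Prod.mk.injEq]
    push_cast
    omega

theorem vB_01 (idx : Int) (h1 : -15 ≤ idx) (h2 : idx ≤ 16) (i : Int)
    (hi : i = 0 ∨ i = 1 ∨ i = 2 ∨ i = 3) : vB i idx = 0 ∨ vB i idx = 1 := by
  have hmem : PySem.List.pyGetD piecesA (idx - 1) ([] : List Int) ∈ piecesA := by
    refine PySem.List.pyGetD_mem piecesA ([] : List Int) ?_
    have hlen : piecesA.length = 16 := by decide
    unfold PySem.Raise.InRange
    rw [hlen]
    exact ⟨by omega, by omega⟩
  have hall : ∀ ch ∈ piecesA, ∀ j ∈ ([0, 1, 2, 3] : List Int),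
      PySem.List.pyGetD ch j (0 : Int) = 0 ∨ PySem.List.pyGetD ch j (0 : Int) = 1 := by decide
  have hi' : i ∈ ([0, 1, 2, 3] : List Int) := by
    rcases hi with h | h | h | h <;> simp [h]
  exact hall _ hmem i hi'

-- set(vals) has exactly one element iff vals is nonempty and all its elements are equal
theorem setlen_one_iff (vals : List Int) :
    (PySem.Set.ofList vals).length = 1 ↔ ∃ a, vals ≠ [] ∧ ∀ x ∈ vals, x = a := by
  constructor
  · intro h
    rcases List.length_eq_one_iff.mp h with ⟨a, ha⟩
    refine ⟨a, ?_, ?_⟩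
    · intro hnil; simp [hnil, PySem.Set.ofList] at ha
    · intro x hx
      have : x ∈ PySem.Set.ofList vals := (PySem.Set.mem_ofList _ _).mpr hx
      rw [ha] at this; simpa using this
  · rintro ⟨a, hne, hall⟩
    have hnd : (PySem.Set.ofList vals).Nodup := PySem.Set.nodup_ofList vals
    have hmem : ∀ x ∈ PySem.Set.ofList vals, x = a := by
      intro x hx; exact hall x ((PySem.Set.mem_ofList _ _).mp hx)
    have hane : PySem.Set.ofList vals ≠ [] := by
      rcases List.exists_mem_of_ne_nil vals hne with ⟨y, hy⟩
      intro hnil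
      have : y ∈ PySem.Set.ofList vals := (PySem.Set.mem_ofList _ _).mpr hy
      simp [hnil] at this
    rcases List.exists_cons_of_ne_nil hane with ⟨z, zs, hz⟩
    rw [hz]
    rw [hz] at hnd hmem
    have hz' : z = a := hmem z (by simp)
    have : zs = [] := by
      cases zs with
      | nil => rfl
      | cons w ws =>
        exfalso
        have hw : w = a := hmem w (by simp)
        have := hnd
        simp [hz', hw] at this
    simp [this]

theorem sum_bounds (vals : List Int) (h : ∀ x ∈ vals, x = 0 ∨ x = 1) :
    0 ≤ vals.sum ∧ vals.sum ≤ (vals.length : Int) := by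
  induction vals with
  | nil => simp
  | cons x xs ih =>
    have hx := h x (by simp)
    have := ih (fun y hy => h y (by simp [hy]))
    simp only [List.sum_cons, List.length_cons]
    push_cast
    omega

theorem sum_zero_iff (vals : List Int) (h : ∀ x ∈ vals, x = 0 ∨ x = 1) :
    vals.sum = 0 ↔ ∀ x ∈ vals, x = 0 := by
  induction vals with
  | nil => simp
  | cons x xs ih =>
    have hx := h x (by simp)
    have hxs : ∀ y ∈ xs, y = 0 ∨ y = 1 := fun y hy => h y (by simp [hy])
    have hb := sum_bounds xs hxs
    simp only [List.sum_cons, List.mem_cons]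
    constructor
    · intro hs
      have hx0 : x = 0 := by omega
      have : xs.sum = 0 := by omega
      exact fun y hy => hy.elim (fun e => e ▸ hx0) (fun hy' => (ih hxs).mp this y hy')
    · intro hall
      have hx0 : x = 0 := hall x (Or.inl rfl)
      have : xs.sum = 0 := (ih hxs).mpr (fun y hy => hall y (Or.inr hy))
      omega

theorem sum_len_iff (vals : List Int) (h : ∀ x ∈ vals, x = 0 ∨ x = 1) :
    vals.sum = (vals.length : Int) ↔ ∀ x ∈ vals, x = 1 := by
  induction vals with
  | nil => simp
  | cons x xs ih =>
    have hx := h x (by simp)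
    have hxs : ∀ y ∈ xs, y = 0 ∨ y = 1 := fun y hy => h y (by simp [hy])
    have hb := sum_bounds xs hxs
    simp only [List.sum_cons, List.length_cons, List.mem_cons]
    constructor
    · intro hs
      have hx1 : x = 1 := by push_cast at hs ⊢; omega
      have : xs.sum = (xs.length : Int) := by push_cast at hs ⊢; omega
      exact fun y hy => hy.elim (fun e => e ▸ hx1) (fun hy' => (ih hxs).mp this y hy')
    · intro hall
      have hx1 : x = 1 := hall x (Or.inl rfl)
      have : xs.sum = (xs.length : Int) := (ih hxs).mpr (fun y hy => hall y (Or.inr hy))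
      push_cast
      omega

-- the per-attribute bridge: A's "set has one element" equals B's "sum is 0 or the count"
theorem attr_bridge (vals : List Int) (hne : vals ≠ []) (h : ∀ x ∈ vals, x = 0 ∨ x = 1) :
    (PySem.Set.len (PySem.Set.ofList vals) == 1) =
      (vals.sum == 0 || vals.sum == (vals.length : Int)) := by
  rw [Bool.eq_iff_iff]
  simp only [Bool.or_eq_true, beq_iff_eq, PySem.Set.len]
  have hcast : ((PySem.Set.ofList vals).length : Int) = 1 ↔ (PySem.Set.ofList vals).length = 1 := by
    omega
  rw [hcast, setlen_one_iff]
  constructor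
  · rintro ⟨a, -, hall⟩
    rcases List.exists_mem_of_ne_nil vals hne with ⟨y, hy⟩
    rcases h y hy with hy0 | hy1
    · left
      exact (sum_zero_iff vals h).mpr (fun x hx => (hall x hx).trans ((hall y hy).symm.trans hy0))
    · right
      exact (sum_len_iff vals h).mpr (fun x hx => (hall x hx).trans ((hall y hy).symm.trans hy1))
  · rintro (hs | hs)
    · exact ⟨0, hne, (sum_zero_iff vals h).mp hs⟩
    · exact ⟨1, hne, (sum_len_iff vals h).mp hs⟩

theorem pyRange04 : PySem.List.pyRange 0 4 1 = [0, 1, 2, 3] := by decide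

-- ===== VERDICT (by name: the statement is the Claim_ definition above) =====
theorem line_win_spec : Claim_equal_line_win := by
  intro line _ hpre
  unfold Spec_line_win
  by_cases h0 : (0 : Int) ∈ line
  · simp [line_win, line_win_alt, h0]
  · have hrange : ∀ idx ∈ line, -15 ≤ idx ∧ idx ≤ 16 := hpre.resolve_left h0
    cases hl : line with
    | nil => subst hl; decide
    | cons z zs =>
      rw [← hl]
      have hne : line ≠ [] := by simp [hl]
      have h01 : ∀ i : Int, i = 0 ∨ i = 1 ∨ i = 2 ∨ i = 3 →
          ∀ x ∈ line.map (vB i), x = 0 ∨ x = 1 := by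
        intro i hi x hx
        rcases List.mem_map.mp hx with ⟨idx, hidx, rfl⟩
        exact vB_01 idx (hrange idx hidx).1 (hrange idx hidx).2 i hi
      have hmne : ∀ i : Int, line.map (vB i) ≠ [] := by
        intro i h; exact hne (List.map_eq_nil_iff.mp h)
      have hcontains : line.contains (0 : Int) = false := by
        simpa using h0
      have hempty : line.isEmpty = false := by
        simp [hne]
      rw [line_win, line_win_alt, hcontains, hempty]
      simp only [Bool.false_or]
      rw [pyRange04, foldB_eq]
      have hmap : ∀ i : Int,
          (line.map (fun idx => PySem.List.pyGetD piecesA (idx - 1) ([] : List Int))).map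
            (fun ch => PySem.List.pyGetD ch i (0 : Int)) = line.map (vB i) := by
        intro i; rw [List.map_map]; rfl
      simp only [List.any_cons, List.any_nil, Bool.or_false, hmap, zero_add]
      rw [attr_bridge _ (hmne 0) (h01 0 (by norm_num)),
          attr_bridge _ (hmne 1) (h01 1 (by norm_num)),
          attr_bridge _ (hmne 2) (h01 2 (by norm_num)),
          attr_bridge _ (hmne 3) (h01 3 (by norm_num))]
      simp [List.length_map]
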